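-- pv_equiv track=rewrite | github.com/jakey-poo-42/project_showcase | AI preference engine/preferenceLogic.py | determineQualitativePreference
-- ===== SOURCE A (Python) =====
-- def determineQualitativePreference(obj1: tuple, obj2: tuple):
--     """
--     Determines which of the two objects is better according to their SDs. Returns the number of the object that is
--     more preferred, 0 if they are congruent, or -1 if they are incomparable.\n
--     objx : A tuple containing the object itself and its SDs
--     """
--     # Determines out of two objects and their SDs, which is better.
--     # Returns the number of the object that is better, 0 if they are congruent, or -1 if they are incomparable
--     result = 0
--     j = 0
--     for i in obj1[1]:
--         if i < obj2[1][j]: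
--             if result != 2:
--                 result = 1
--             else:
--                 return -1
--         elif i > obj2[1][j]:
--             if result != 1:
--                 result = 2
--             else:
--                 return -1
--         j += 1
--
--     return result
-- ===== SOURCE B (Python) =====
-- def determineQualitativePreference(obj1: tuple, obj2: tuple):
--     """Element-wise SD dominance: two independent any() scans instead of one
--     stateful loop; same IndexError behaviour via explicit range(len) indexing."""
--     sd1, sd2 = obj1[1], obj2[1]
--     less = any(sd1[j] < sd2[j] for j in range(len(sd1)))
--     greater = any(sd1[j] > sd2[j] for j in range(len(sd1)))
--     if less and greater:
--         return -1
--     if less: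
--         return 1
--     if greater:
--         return 2
--     return 0
-- ===== Notes on version B (the rewrite author's own statement) =====
-- stated objective: simpler
-- what changed: Replaces A's single stateful loop (result/j state machine with early -1 returns) by two independent short-circuiting any() scans for 'some element less' and 'some element greater', combined by a four-way branch.
import Mathlib
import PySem

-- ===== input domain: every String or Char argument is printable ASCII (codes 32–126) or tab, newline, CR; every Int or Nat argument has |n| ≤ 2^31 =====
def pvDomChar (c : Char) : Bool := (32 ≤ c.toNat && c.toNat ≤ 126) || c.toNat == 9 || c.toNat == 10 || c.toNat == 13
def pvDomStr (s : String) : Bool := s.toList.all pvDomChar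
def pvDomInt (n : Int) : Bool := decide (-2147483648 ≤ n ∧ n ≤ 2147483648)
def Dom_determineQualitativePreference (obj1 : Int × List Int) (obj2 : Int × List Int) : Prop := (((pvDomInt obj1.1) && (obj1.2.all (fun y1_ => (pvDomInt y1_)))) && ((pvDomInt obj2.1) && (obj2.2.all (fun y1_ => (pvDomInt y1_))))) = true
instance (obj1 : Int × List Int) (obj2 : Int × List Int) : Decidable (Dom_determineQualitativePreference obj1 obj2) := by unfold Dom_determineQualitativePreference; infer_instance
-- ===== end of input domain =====

-- B replaces A's stateful result/j loop by two independent any()-scans combined by a branch (objective: simpler).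

-- ===== PORT A =====
-- A's for-loop over obj1[1] with counter j and state `result`, early `return -1`.
-- `none` from pyGet? is Python's IndexError; Pre_ excludes those inputs (junk value 0 there).
def pvALoop (l2 : List Int) : List Int → Int → Int → Int
  | [], _, result => result
  | i :: rest, j, result =>
    match PySem.List.pyGet? l2 j with
    | none => 0
    | some v =>
      if i < v then
        if result ≠ 2 then pvALoop l2 rest (j + 1) 1 else -1
      else if i > v then
        if result ≠ 1 then pvALoop l2 rest (j + 1) 2 else -1
      else pvALoop l2 rest (j + 1) result

def determineQualitativePreference (obj1 : Int × List Int) (obj2 : Int × List Int) : Int :=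
  pvALoop obj2.2 obj1.2 0 0

-- ===== PORT B =====
-- any(p(sd1[j], sd2[j]) for j in range(len(sd1))): short-circuiting scan by explicit index;
-- `none` = IndexError from sd2[j] (excluded by Pre_, junk value 0 at the caller).
def pvAnyIdx (p : Int → Int → Bool) (l2 : List Int) : List Int → Int → Option Bool
  | [], _ => some false
  | i :: rest, j =>
    match PySem.List.pyGet? l2 j with
    | none => none
    | some v => if p i v then some true else pvAnyIdx p l2 rest (j + 1)

def determineQualitativePreference_alt (obj1 : Int × List Int) (obj2 : Int × List Int) : Int :=
  match pvAnyIdx (fun a b => a < b) obj2.2 obj1.2 0 with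
  | none => 0
  | some less =>
    match pvAnyIdx (fun a b => a > b) obj2.2 obj1.2 0 with
    | none => 0
    | some greater =>
      if less && greater then -1
      else if less then 1
      else if greater then 2
      else 0

-- ===== PRECONDITION & SPEC =====
-- Pre_ excludes exactly the inputs where Python A raises IndexError: obj1's SD list longer than
-- obj2's, unless a strict '<' and a strict '>' both occur within the common prefix (then A
-- returns -1 before reaching the out-of-range index; B raises on exactly the same inputs).
def Pre_determineQualitativePreference (obj1 : Int × List Int) (obj2 : Int × List Int) : Prop :=
  obj1.2.length ≤ obj2.2.length ∨
    ((∃ j < obj2.2.length, obj1.2.getD j 0 < obj2.2.getD j 0) ∧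
     (∃ j < obj2.2.length, obj1.2.getD j 0 > obj2.2.getD j 0))
instance (obj1 : Int × List Int) (obj2 : Int × List Int) : Decidable (Pre_determineQualitativePreference obj1 obj2) := by unfold Pre_determineQualitativePreference; infer_instance

def pvWitness_determineQualitativePreference : (Int × List Int) × (Int × List Int) := ((0, [1, 3]), (0, [2, 2]))

def Spec_determineQualitativePreference (obj1 : Int × List Int) (obj2 : Int × List Int) (out : Int) : Prop := out = determineQualitativePreference_alt obj1 obj2
instance (obj1 : Int × List Int) (obj2 : Int × List Int) (out : Int) : Decidable (Spec_determineQualitativePreference obj1 obj2 out) := by unfold Spec_determineQualitativePreference; infer_instance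

-- ===== CLAIM (what is proved, stated in full; the proofs are below) =====
def Claim_equal_determineQualitativePreference : Prop := ∀ (obj1 : Int × List Int) (obj2 : Int × List Int), Dom_determineQualitativePreference obj1 obj2 → Pre_determineQualitativePreference obj1 obj2 → Spec_determineQualitativePreference obj1 obj2 (determineQualitativePreference obj1 obj2)

-- ===== LEMMAS AND PROOFS =====

-- From state result = 1 ('obj1 has been less somewhere'), A's loop is decided by the '>'-scan.
theorem pvALoop_one (l2 : List Int) (l : List Int) (j : Int) :
    pvALoop l2 l j 1 =
      match pvAnyIdx (fun a b => a > b) l2 l j with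
      | none => 0 | some true => -1 | some false => 1 := by
  induction l generalizing j with
  | nil => simp [pvALoop, pvAnyIdx]
  | cons i rest ih =>
    simp only [pvALoop, pvAnyIdx]
    cases h : PySem.List.pyGet? l2 j with
    | none => simp
    | some v =>
      simp only
      by_cases h1 : i < v
      · have h2 : ¬ (i > v) := by omega
        simp [h1, h2, ih]
      · by_cases h2 : i > v
        · simp [h1, h2]
        · simp [h1, h2, ih]

-- From state result = 2 ('obj1 has been greater somewhere'), decided by the '<'-scan.
theorem pvALoop_two (l2 : List Int) (l : List Int) (j : Int) :
    pvALoop l2 l j 2 =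
      match pvAnyIdx (fun a b => a < b) l2 l j with
      | none => 0 | some true => -1 | some false => 2 := by
  induction l generalizing j with
  | nil => simp [pvALoop, pvAnyIdx]
  | cons i rest ih =>
    simp only [pvALoop, pvAnyIdx]
    cases h : PySem.List.pyGet? l2 j with
    | none => simp
    | some v =>
      simp only
      by_cases h1 : i < v
      · simp [h1]
      · by_cases h2 : i > v
        · simp [h1, h2, ih]
        · simp [h1, h2, ih]

-- From state 0, A's loop equals B's combination of the two scans (everywhere, error cases included).
theorem pvALoop_zero (l2 : List Int) (l : List Int) (j : Int) :
    pvALoop l2 l j 0 =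
      match pvAnyIdx (fun a b => a < b) l2 l j with
      | none => 0
      | some less =>
        match pvAnyIdx (fun a b => a > b) l2 l j with
        | none => 0
        | some greater =>
          if less && greater then -1 else if less then 1 else if greater then 2 else 0 := by
  induction l generalizing j with
  | nil => simp [pvALoop, pvAnyIdx]
  | cons i rest ih =>
    simp only [pvALoop, pvAnyIdx]
    cases h : PySem.List.pyGet? l2 j with
    | none => simp
    | some v =>
      simp only
      by_cases h1 : i < v
      · have h2 : ¬ (i > v) := by omega
        simp only [h1, if_true, h2, if_false]
        rw [if_pos (by decide), pvALoop_one]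
        cases hg : pvAnyIdx (fun a b => a > b) l2 rest (j + 1) with
        | none => simp
        | some g => cases g <;> simp
      · by_cases h2 : i > v
        · simp only [h1, if_false, h2, if_true]
          rw [if_pos (by decide), pvALoop_two]
          cases hl : pvAnyIdx (fun a b => a < b) l2 rest (j + 1) with
          | none => simp
          | some b => cases b <;> simp
        · simp [h1, h2, ih]

-- ===== VERDICT (by name: the statement is the Claim_ definition above) =====
theorem determineQualitativePreference_spec : Claim_equal_determineQualitativePreference := by
  intro obj1 obj2 _ _
  unfold Spec_determineQualitativePreference determineQualitativePreference determineQualitativePreference_alt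
  exact pvALoop_zero obj2.2 obj1.2 0
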